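-- pv_equiv track=rewrite | github.com/ramtanniru/DSA | Python/DP/3D/chocolatesPickUp.py | solve
-- ===== SOURCE A (Python) =====
-- def solve(n, m, grid):
--     def rec(i=0,j=0,k=len(grid[0])-1):
--         if not 0<=j<len(grid[0]) or not 0<=k<len(grid[0]):
--             return 0
--         if i==len(grid)-1:
--             if j==k:
--                 return grid[i][j]
--             return grid[i][j]+grid[i][k]
--         if dp[i][j][k]!=-1:
--             return dp[i][j][k]
--         res = 0
--         for d1 in range(-1,2):
--             for d2 in range(-1,2):
--                 if 0<=j+d1<len(grid[0]) and 0<=k+d2<len(grid[0]):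
--                     if j!=k:
--                         res = max(res,grid[i][j]+grid[i][k]+rec(i+1,j+d1,k+d2))
--                     else:
--                         res = max(res,grid[i][j]+rec(i+1,j+d1,k+d2))
--         dp[i][j][k] = res
--         return dp[i][j][k]
--     dp = [[[-1 for k in range(len(grid[0]))] for j in range(len(grid[0]))] for i in range(len(grid))]
--     return rec()
-- ===== SOURCE B (Python) =====
-- def solve(n, m, grid):
--     # Bottom-up tabulated DP over the two robots' column positions.
--     w = len(grid[0])
--     if w == 0:
--         return 0
--     dp = [[grid[-1][j] + (grid[-1][k] if j != k else 0) for k in range(w)]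
--           for j in range(w)]
--     for i in range(len(grid) - 2, -1, -1):
--         ndp = []
--         for j in range(w):
--             row = []
--             for k in range(w):
--                 best = dp[j][k]
--                 for d1 in (-1, 0, 1):
--                     for d2 in (-1, 0, 1):
--                         jj, kk = j + d1, k + d2
--                         if 0 <= jj < w and 0 <= kk < w:
--                             best = max(best, dp[jj][kk])
--                 gain = grid[i][j] + (grid[i][k] if j != k else 0)
--                 row.append(max(0, gain + best))
--             ndp.append(row)
--         dp = ndp
--     return dp[0][w - 1]
-- ===== Notes on version B (the rewrite author's own statement) =====
-- stated objective: alternative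
-- what changed: Replaced the memoized top-down recursion (closure mutating a 3D memo table) by a bottom-up tabulated DP that keeps only one w x w layer per row and fills it from the last row upward.
import Mathlib
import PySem

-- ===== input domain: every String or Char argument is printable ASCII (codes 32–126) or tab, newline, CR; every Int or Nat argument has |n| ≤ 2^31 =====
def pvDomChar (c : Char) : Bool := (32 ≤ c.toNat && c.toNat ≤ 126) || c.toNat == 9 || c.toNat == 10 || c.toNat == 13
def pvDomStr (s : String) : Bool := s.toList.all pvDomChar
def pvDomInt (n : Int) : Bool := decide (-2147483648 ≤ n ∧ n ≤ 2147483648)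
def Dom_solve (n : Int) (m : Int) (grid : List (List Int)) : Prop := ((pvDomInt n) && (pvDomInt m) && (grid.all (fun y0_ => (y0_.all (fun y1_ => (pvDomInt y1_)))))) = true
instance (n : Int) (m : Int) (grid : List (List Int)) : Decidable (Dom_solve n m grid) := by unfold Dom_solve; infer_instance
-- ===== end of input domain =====

-- B replaces A's memoized top-down recursion by a bottom-up tabulated DP keeping one w×w layer per row (alternative decomposition, same asymptotic cost).


-- ===== PORT A =====
-- grid[i][j]; Pre_solve keeps every such access in range, the defaults are never used there
def pvGridGet (grid : List (List Int)) (i j : Int) : Int :=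
  PySem.List.pyGetD (PySem.List.pyGetD grid i []) j 0

-- A's inner `rec`, with the mutable 3D memo `dp` (init -1 = absent) threaded as a Dict
-- keyed by (i,j,k); `fuel` is a plain depth counter (solve passes len(grid), never exhausted).
def solveRecA (grid : List (List Int)) (w rowsm1 : Int) :
    Nat → Int → Int → Int → PySem.Dict (Int × Int × Int) Int →
    Int × PySem.Dict (Int × Int × Int) Int
  | 0, _, _, _, dp => (0, dp)
  | fuel + 1, i, j, k, dp =>
    if ¬ (0 ≤ j ∧ j < w) ∨ ¬ (0 ≤ k ∧ k < w) then (0, dp)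
    else if i = rowsm1 then
      (if j = k then pvGridGet grid i j else pvGridGet grid i j + pvGridGet grid i k, dp)
    else if PySem.Dict.getD dp (i, j, k) (-1) ≠ -1 then (PySem.Dict.getD dp (i, j, k) (-1), dp)
    else
      let st :=
        (PySem.List.pyRange (-1) 2 1).foldl (fun st d1 =>
          (PySem.List.pyRange (-1) 2 1).foldl (fun st2 d2 =>
            if (0 ≤ j + d1 ∧ j + d1 < w) ∧ (0 ≤ k + d2 ∧ k + d2 < w) then
              let r := solveRecA grid w rowsm1 fuel (i + 1) (j + d1) (k + d2) st2.2
              if j ≠ k then (max st2.1 (pvGridGet grid i j + pvGridGet grid i k + r.1), r.2)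
              else (max st2.1 (pvGridGet grid i j + r.1), r.2)
            else st2) st) (0, dp)
      (st.1, PySem.Dict.insert st.2 (i, j, k) st.1)

def solve (n : Int) (m : Int) (grid : List (List Int)) : Int :=
  -- len(grid[0]): grid ≠ [] under Pre_solve, so the [] default is never used
  let w : Int := ((PySem.List.pyGetD grid 0 []).length : Int)
  (solveRecA grid w ((grid.length : Int) - 1) grid.length 0 0 (w - 1) PySem.Dict.empty).1

-- ===== PORT B =====
-- one cell of the new layer: max(0, gain + best over the 9 reachable cells of the layer below)
def bCell (grid : List (List Int)) (w : Int) (dp : List (List Int)) (i j k : Int) : Int :=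
  let best :=
    ([-1, 0, 1] : List Int).foldl (fun best d1 =>
      ([-1, 0, 1] : List Int).foldl (fun best d2 =>
        if (0 ≤ j + d1 ∧ j + d1 < w) ∧ (0 ≤ k + d2 ∧ k + d2 < w) then
          max best (PySem.List.pyGetD (PySem.List.pyGetD dp (j + d1) []) (k + d2) 0)
        else best) best)
      (PySem.List.pyGetD (PySem.List.pyGetD dp j []) k 0)
  let gain := PySem.List.pyGetD (PySem.List.pyGetD grid i []) j 0 +
    (if j ≠ k then PySem.List.pyGetD (PySem.List.pyGetD grid i []) k 0 else 0)
  max 0 (gain + best)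

-- the body of B's `for i in range(len(grid)-2, -1, -1)` loop: build the next layer ndp
def bStep (grid : List (List Int)) (w : Int) (dp : List (List Int)) (i : Int) : List (List Int) :=
  (PySem.List.pyRange 0 w 1).foldl (fun ndp j =>
    ndp ++ [(PySem.List.pyRange 0 w 1).foldl (fun row k =>
      row ++ [bCell grid w dp i j k]) []]) []

def solve_alt (n : Int) (m : Int) (grid : List (List Int)) : Int :=
  let w : Int := ((PySem.List.pyGetD grid 0 []).length : Int)
  if w = 0 then 0
  else
    let last := PySem.List.pyGetD grid (-1) []
    let dp0 := (PySem.List.pyRange 0 w 1).map (fun j =>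
      (PySem.List.pyRange 0 w 1).map (fun k =>
        PySem.List.pyGetD last j 0 + (if j ≠ k then PySem.List.pyGetD last k 0 else 0)))
    let dp := (PySem.List.pyRange ((grid.length : Int) - 2) (-1) (-1)).foldl (bStep grid w) dp0
    PySem.List.pyGetD (PySem.List.pyGetD dp 0 []) (w - 1) 0

-- ===== PRECONDITION & SPEC =====
-- Pre_solve excludes exactly the inputs where Python A raises: the empty grid (IndexError
-- evaluating len(grid[0])) and, when the first row is nonempty, grids with some row shorter
-- than the first (IndexError on grid[i][j]); A returns on every other input.
def Pre_solve (n : Int) (m : Int) (grid : List (List Int)) : Prop :=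
  grid ≠ [] ∧ (grid.headI.length = 0 ∨ ∀ r ∈ grid, grid.headI.length ≤ r.length)
instance (n : Int) (m : Int) (grid : List (List Int)) : Decidable (Pre_solve n m grid) := by
  unfold Pre_solve; infer_instance

def pvWitness_solve : Int × Int × List (List Int) := (2, 2, [[3, 1], [2, 5]])

def Spec_solve (n : Int) (m : Int) (grid : List (List Int)) (out : Int) : Prop := out = solve_alt n m grid
instance (n : Int) (m : Int) (grid : List (List Int)) (out : Int) : Decidable (Spec_solve n m grid out) := by unfold Spec_solve; infer_instance

-- ===== CLAIM (what is proved, stated in full; the proofs are below) =====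
def Claim_equal_solve : Prop := ∀ (n : Int) (m : Int) (grid : List (List Int)), Dom_solve n m grid → Pre_solve n m grid → Spec_solve n m grid (solve n m grid)

-- ===== LEMMAS AND PROOFS =====

-- pure (memo-free) version of A's recursion: the common specification of both ports
def pureRecA (grid : List (List Int)) (w rowsm1 : Int) : Nat → Int → Int → Int → Int
  | 0, _, _, _ => 0
  | fuel + 1, i, j, k =>
    if ¬ (0 ≤ j ∧ j < w) ∨ ¬ (0 ≤ k ∧ k < w) then 0
    else if i = rowsm1 then
      if j = k then pvGridGet grid i j else pvGridGet grid i j + pvGridGet grid i k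
    else
      (PySem.List.pyRange (-1) 2 1).foldl (fun r d1 =>
        (PySem.List.pyRange (-1) 2 1).foldl (fun r2 d2 =>
          if (0 ≤ j + d1 ∧ j + d1 < w) ∧ (0 ≤ k + d2 ∧ k + d2 < w) then
            if j ≠ k then max r2 (pvGridGet grid i j + pvGridGet grid i k + pureRecA grid w rowsm1 fuel (i + 1) (j + d1) (k + d2))
            else max r2 (pvGridGet grid i j + pureRecA grid w rowsm1 fuel (i + 1) (j + d1) (k + d2))
          else r2) r) 0

-- a relation preserved by each step is preserved by the whole fold
theorem pvFoldlPres {A B C : Type} (R : A → B → Prop) (f : A → C → A) (g : B → C → B)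
    (h : ∀ a b c, R a b → R (f a c) (g b c)) :
    ∀ (l : List C) (a : A) (b : B), R a b → R (l.foldl f a) (l.foldl g b) := by
  intro l
  induction l with
  | nil => intro a b hr; exact hr
  | cons x t ih => intro a b hr; exact ih _ _ (h _ _ _ hr)

-- a nested fold over two lists is a fold over the list of pairs
theorem pvFoldlNested {A B C : Type} (l1 : List A) (l2 : List B) (f : C → A → B → C) :
    ∀ init : C, l1.foldl (fun r a => l2.foldl (fun r' b => f r' a b) r) init
      = (l1.flatMap (fun a => l2.map (fun b => (a, b)))).foldl (fun r p => f r p.1 p.2) init := by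
  induction l1 with
  | nil => intro init; rfl
  | cons x t ih => intro init; simp [List.foldl_append, List.foldl_map, ih]

theorem pvRange3 : PySem.List.pyRange (-1) 2 1 = [-1, 0, 1] := by decide

def pvL9 : List (Int × Int) :=
  [(-1, -1), (-1, 0), (-1, 1), (0, -1), (0, 0), (0, 1), (1, -1), (1, 0), (1, 1)]

theorem pvL9_eq : (([-1, 0, 1] : List Int).flatMap (fun a => ([-1, 0, 1] : List Int).map (fun b => (a, b)))) = pvL9 := by decide

-- option-valued running max over the admitted elements
def pvOM (bnd : Int × Int → Prop) [DecidablePred bnd] (C : Int × Int → Int)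
    (L : List (Int × Int)) (o : Option Int) : Option Int :=
  L.foldl (fun o p => if bnd p then some (match o with | none => C p | some v => max v (C p)) else o) o

theorem pvOM_some {bnd : Int × Int → Prop} [DecidablePred bnd] {C : Int × Int → Int} :
    ∀ (L : List (Int × Int)) (u : Int), ∃ v, pvOM bnd C L (some u) = some v ∧ u ≤ v := by
  intro L
  induction L with
  | nil => intro u; exact ⟨u, rfl, le_refl u⟩
  | cons p t ih =>
    intro u
    by_cases hp : bnd p
    · obtain ⟨v, hv, huv⟩ := ih (max u (C p))
      exact ⟨v, by simpa [pvOM, hp] using hv, le_trans (le_max_left _ _) huv⟩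
    · obtain ⟨v, hv, huv⟩ := ih u
      exact ⟨v, by simpa [pvOM, hp] using hv, huv⟩

theorem pvOM_mem {bnd : Int × Int → Prop} [DecidablePred bnd] {C : Int × Int → Int}
    {q0 : Int × Int} (hb : bnd q0) :
    ∀ (L : List (Int × Int)) (o : Option Int), q0 ∈ L →
      ∃ v, pvOM bnd C L o = some v ∧ C q0 ≤ v := by
  intro L
  induction L with
  | nil => intro o h; cases h
  | cons p t ih =>
    intro o hmem
    rcases List.mem_cons.mp hmem with hq | hq
    · subst hq
      cases o with
      | none =>
        obtain ⟨v, hv, huv⟩ := pvOM_some (bnd := bnd) (C := C) t (C q0)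
        exact ⟨v, by simpa [pvOM, hb] using hv, huv⟩
      | some u =>
        obtain ⟨v, hv, huv⟩ := pvOM_some (bnd := bnd) (C := C) t (max u (C q0))
        exact ⟨v, by simpa [pvOM, hb] using hv, le_trans (le_max_right _ _) huv⟩
    · by_cases hp : bnd p
      · obtain ⟨v, hv, huv⟩ := ih (some (match o with | none => C p | some v => max v (C p))) hq
        exact ⟨v, by simpa [pvOM, hp] using hv, huv⟩
      · obtain ⟨v, hv, huv⟩ := ih o hq
        exact ⟨v, by simpa [pvOM, hp] using hv, huv⟩

-- the core algebra: A's floored fold of (gain + child) = max 0 (gain + running max of children)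
theorem pvFoldMax (bnd : Int × Int → Prop) [DecidablePred bnd] (C : Int × Int → Int) (g : Int)
    (L : List (Int × Int)) (q0 : Int × Int) (hq : q0 ∈ L) (hb : bnd q0)
    (b0 : Int) (hb0 : b0 = C q0) :
    L.foldl (fun r p => if bnd p then max r (g + C p) else r) 0
      = max 0 (g + L.foldl (fun b p => if bnd p then max b (C p) else b) b0) := by
  have hA := pvFoldlPres
      (fun (r : Int) (o : Option Int) => r = match o with | none => 0 | some v => max 0 (g + v))
      (fun r p => if bnd p then max r (g + C p) else r)
      (fun o p => if bnd p then some (match o with | none => C p | some v => max v (C p)) else o)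
      (by
        intro a b c h
        by_cases hc : bnd c
        · cases b with
          | none => simp [hc] at h ⊢; omega
          | some v => simp [hc] at h ⊢; omega
        · simpa [hc] using h)
      L 0 none rfl
  have hB := pvFoldlPres
      (fun (b : Int) (o : Option Int) => b = match o with | none => b0 | some v => max b0 v)
      (fun b p => if bnd p then max b (C p) else b)
      (fun o p => if bnd p then some (match o with | none => C p | some v => max v (C p)) else o)
      (by
        intro a b c h
        by_cases hc : bnd c
        · cases b with
          | none => simp [hc] at h ⊢; omega
          | some v => simp [hc] at h ⊢; omega
        · simpa [hc] using h)
      L b0 none rfl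
  obtain ⟨v, hv, hle⟩ := pvOM_mem (bnd := bnd) (C := C) hb L none hq
  unfold pvOM at hv
  rw [hA, hB, hv]
  simp only []
  omega

-- memo-table invariant: every stored value is the pure value at its key
def pvInv (grid : List (List Int)) (w rowsm1 : Int) (d : PySem.Dict (Int × Int × Int) Int) : Prop :=
  ∀ i j k v, d.get? (i, j, k) = some v → v = pureRecA grid w rowsm1 (rowsm1 + 1 - i).toNat i j k

theorem pvMemo (grid : List (List Int)) (w rowsm1 : Int) :
    ∀ (fuel : Nat) (i j k : Int) (d : PySem.Dict (Int × Int × Int) Int),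
      (fuel : Int) = rowsm1 + 1 - i → pvInv grid w rowsm1 d →
      (solveRecA grid w rowsm1 fuel i j k d).1 = pureRecA grid w rowsm1 fuel i j k ∧
      pvInv grid w rowsm1 (solveRecA grid w rowsm1 fuel i j k d).2 := by
  intro fuel
  induction fuel with
  | zero => intro i j k d hf hinv; exact ⟨rfl, hinv⟩
  | succ fuel ih =>
    intro i j k d hf hinv
    by_cases hoob : ¬ (0 ≤ j ∧ j < w) ∨ ¬ (0 ≤ k ∧ k < w)
    · have e : solveRecA grid w rowsm1 (fuel + 1) i j k d = (0, d) := by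
        simp only [solveRecA]; rw [if_pos hoob]
      have e2 : pureRecA grid w rowsm1 (fuel + 1) i j k = 0 := by
        simp only [pureRecA]; rw [if_pos hoob]
      rw [e, e2]; exact ⟨rfl, hinv⟩
    · by_cases hir : i = rowsm1
      · have e : solveRecA grid w rowsm1 (fuel + 1) i j k d =
            (if j = k then pvGridGet grid i j else pvGridGet grid i j + pvGridGet grid i k, d) := by
          simp only [solveRecA]; rw [if_neg hoob, if_pos hir]
        have e2 : pureRecA grid w rowsm1 (fuel + 1) i j k =
            (if j = k then pvGridGet grid i j else pvGridGet grid i j + pvGridGet grid i k) := by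
          simp only [pureRecA]; rw [if_neg hoob, if_pos hir]
        rw [e, e2]; exact ⟨rfl, hinv⟩
      · have hfuel : (fuel : Int) = rowsm1 + 1 - (i + 1) := by push_cast at hf ⊢; omega
        have hpure : pureRecA grid w rowsm1 (fuel + 1) i j k =
            (PySem.List.pyRange (-1) 2 1).foldl (fun r d1 =>
              (PySem.List.pyRange (-1) 2 1).foldl (fun r2 d2 =>
                if (0 ≤ j + d1 ∧ j + d1 < w) ∧ (0 ≤ k + d2 ∧ k + d2 < w) then
                  if j ≠ k then max r2 (pvGridGet grid i j + pvGridGet grid i k + pureRecA grid w rowsm1 fuel (i + 1) (j + d1) (k + d2))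
                  else max r2 (pvGridGet grid i j + pureRecA grid w rowsm1 fuel (i + 1) (j + d1) (k + d2))
                else r2) r) 0 := by
          simp only [pureRecA]; rw [if_neg hoob, if_neg hir]
        by_cases hmemo : PySem.Dict.getD d (i, j, k) (-1) ≠ -1
        · rcases hg : d.get? (i, j, k) with _ | v
          · exact absurd (by rw [PySem.Dict.getD_eq_get?_getD, hg]; rfl) hmemo
          · have hv := hinv i j k v hg
            have hfn : (rowsm1 + 1 - i).toNat = fuel + 1 := by omega
            rw [hfn] at hv
            have hget : PySem.Dict.getD d (i, j, k) (-1) = v := by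
              rw [PySem.Dict.getD_eq_get?_getD, hg]; rfl
            have e : solveRecA grid w rowsm1 (fuel + 1) i j k d =
                (PySem.Dict.getD d (i, j, k) (-1), d) := by
              simp only [solveRecA]; rw [if_neg hoob, if_neg hir, if_pos hmemo]
            rw [e]
            exact ⟨by rw [hget]; exact hv, hinv⟩
        · have hR := pvFoldlPres
            (fun (st : Int × PySem.Dict (Int × Int × Int) Int) (r : Int) =>
              st.1 = r ∧ pvInv grid w rowsm1 st.2)
            (fun st d1 =>
              (PySem.List.pyRange (-1) 2 1).foldl (fun st2 d2 =>
                if (0 ≤ j + d1 ∧ j + d1 < w) ∧ (0 ≤ k + d2 ∧ k + d2 < w) then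
                  let r := solveRecA grid w rowsm1 fuel (i + 1) (j + d1) (k + d2) st2.2
                  if j ≠ k then (max st2.1 (pvGridGet grid i j + pvGridGet grid i k + r.1), r.2)
                  else (max st2.1 (pvGridGet grid i j + r.1), r.2)
                else st2) st)
            (fun r d1 =>
              (PySem.List.pyRange (-1) 2 1).foldl (fun r2 d2 =>
                if (0 ≤ j + d1 ∧ j + d1 < w) ∧ (0 ≤ k + d2 ∧ k + d2 < w) then
                  if j ≠ k then max r2 (pvGridGet grid i j + pvGridGet grid i k + pureRecA grid w rowsm1 fuel (i + 1) (j + d1) (k + d2))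
                  else max r2 (pvGridGet grid i j + pureRecA grid w rowsm1 fuel (i + 1) (j + d1) (k + d2))
                else r2) r)
            (by
              intro st r d1 hst
              refine pvFoldlPres
                (fun (st2 : Int × PySem.Dict (Int × Int × Int) Int) (r2 : Int) =>
                  st2.1 = r2 ∧ pvInv grid w rowsm1 st2.2) _ _ ?_ (PySem.List.pyRange (-1) 2 1) st r hst
              intro st2 r2 d2 hst2
              by_cases hb : (0 ≤ j + d1 ∧ j + d1 < w) ∧ (0 ≤ k + d2 ∧ k + d2 < w)
              · obtain ⟨hch, hchInv⟩ := ih (i + 1) (j + d1) (k + d2) st2.2 hfuel hst2.2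
                by_cases hjk : j ≠ k
                · simp only [if_pos hb, if_pos hjk]
                  exact ⟨by rw [hst2.1, hch], hchInv⟩
                · simp only [if_pos hb, if_neg hjk]
                  exact ⟨by rw [hst2.1, hch], hchInv⟩
              · simp only [if_neg hb]; exact hst2)
            (PySem.List.pyRange (-1) 2 1) (0, d) 0 ⟨rfl, hinv⟩
          rw [not_not] at hmemo
          have e : solveRecA grid w rowsm1 (fuel + 1) i j k d =
              (let st := (PySem.List.pyRange (-1) 2 1).foldl (fun st d1 =>
                  (PySem.List.pyRange (-1) 2 1).foldl (fun st2 d2 =>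
                    if (0 ≤ j + d1 ∧ j + d1 < w) ∧ (0 ≤ k + d2 ∧ k + d2 < w) then
                      let r := solveRecA grid w rowsm1 fuel (i + 1) (j + d1) (k + d2) st2.2
                      if j ≠ k then (max st2.1 (pvGridGet grid i j + pvGridGet grid i k + r.1), r.2)
                      else (max st2.1 (pvGridGet grid i j + r.1), r.2)
                    else st2) st) (0, d)
               (st.1, PySem.Dict.insert st.2 (i, j, k) st.1)) := by
            simp only [solveRecA]; rw [if_neg hoob, if_neg hir, if_neg (not_not.mpr hmemo)]
          rw [e]
          refine ⟨?_, ?_⟩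
          · rw [hpure]; exact hR.1
          · intro i' j' k' v hget
            rw [PySem.Dict.get?_insert] at hget
            by_cases heq : (i', j', k') = ((i, j, k) : Int × Int × Int)
            · rw [if_pos heq] at hget
              obtain ⟨hi', hj', hk'⟩ : i' = i ∧ j' = j ∧ k' = k := by
                simpa [Prod.ext_iff] using heq
              rw [hi', hj', hk']
              have hfn : (rowsm1 + 1 - i).toNat = fuel + 1 := by omega
              rw [hfn, hpure]
              exact (Option.some_inj.mp hget).symm.trans hR.1
            · rw [if_neg heq] at hget
              exact hR.2 i' j' k' v hget

theorem pvBStep_eq (grid : List (List Int)) (w : Int) (dp : List (List Int)) (i : Int) :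
    bStep grid w dp i = (PySem.List.pyRange 0 w 1).map (fun j =>
      (PySem.List.pyRange 0 w 1).map (fun k => bCell grid w dp i j k)) := by
  simp only [bStep, PySem.List.foldl_append_singleton_eq_map, List.nil_append]

-- layer invariant for B's bottom-up loop
def pvTableOK (grid : List (List Int)) (w rowsm1 : Int) (i : Int) (dp : List (List Int)) : Prop :=
  ∀ j k : Int, 0 ≤ j → j < w → 0 ≤ k → k < w →
    PySem.List.pyGetD (PySem.List.pyGetD dp j []) k 0
      = pureRecA grid w rowsm1 (rowsm1 + 1 - i).toNat i j k

theorem pvStep (grid : List (List Int)) (w rowsm1 : Int) (i : Int) (dp : List (List Int))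
    (hi0 : 0 ≤ i) (hi : i < rowsm1) (ht : pvTableOK grid w rowsm1 (i + 1) dp) :
    pvTableOK grid w rowsm1 i (bStep grid w dp i) := by
  intro j k hj0 hj hk0 hk
  rw [pvBStep_eq, PySem.List.pyGetD_map_pyRange_of_nonneg _ _ _ _ hj0 hj,
      PySem.List.pyGetD_map_pyRange_of_nonneg _ _ _ _ hk0 hk]
  set f0 := (rowsm1 - i).toNat with hf0def
  have hf0 : (rowsm1 + 1 - i).toNat = f0 + 1 := by omega
  have hts : ∀ p : Int × Int, (0 ≤ j + p.1 ∧ j + p.1 < w) ∧ (0 ≤ k + p.2 ∧ k + p.2 < w) →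
      PySem.List.pyGetD (PySem.List.pyGetD dp (j + p.1) []) (k + p.2) 0
        = pureRecA grid w rowsm1 f0 (i + 1) (j + p.1) (k + p.2) := by
    intro p hp
    have h := ht (j + p.1) (k + p.2) hp.1.1 hp.1.2 hp.2.1 hp.2.2
    rwa [show (rowsm1 + 1 - (i + 1)).toNat = f0 by omega] at h
  have hRHS : pureRecA grid w rowsm1 (f0 + 1) i j k =
      pvL9.foldl (fun r p =>
        if (0 ≤ j + p.1 ∧ j + p.1 < w) ∧ (0 ≤ k + p.2 ∧ k + p.2 < w) then
          if j ≠ k then max r (pvGridGet grid i j + pvGridGet grid i k + pureRecA grid w rowsm1 f0 (i + 1) (j + p.1) (k + p.2))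
          else max r (pvGridGet grid i j + pureRecA grid w rowsm1 f0 (i + 1) (j + p.1) (k + p.2))
        else r) 0 := by
    simp only [pureRecA]
    rw [if_neg (by omega), if_neg (by omega : ¬ i = rowsm1)]
    rw [pvRange3, pvFoldlNested, pvL9_eq]
  have hLHS : bCell grid w dp i j k =
      max 0 ((pvGridGet grid i j + (if j ≠ k then pvGridGet grid i k else 0)) +
        pvL9.foldl (fun best p =>
          if (0 ≤ j + p.1 ∧ j + p.1 < w) ∧ (0 ≤ k + p.2 ∧ k + p.2 < w) then
            max best (PySem.List.pyGetD (PySem.List.pyGetD dp (j + p.1) []) (k + p.2) 0)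
          else best) (PySem.List.pyGetD (PySem.List.pyGetD dp j []) k 0)) := by
    have hgg : ∀ a b : Int, PySem.List.pyGetD (PySem.List.pyGetD grid a []) b 0 = pvGridGet grid a b :=
      fun _ _ => rfl
    simp only [bCell, hgg]
    rw [pvFoldlNested, pvL9_eq]
  have hfun2 : (fun (r : Int) (p : Int × Int) =>
      if (0 ≤ j + p.1 ∧ j + p.1 < w) ∧ (0 ≤ k + p.2 ∧ k + p.2 < w) then
        if j ≠ k then max r (pvGridGet grid i j + pvGridGet grid i k + pureRecA grid w rowsm1 f0 (i + 1) (j + p.1) (k + p.2))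
        else max r (pvGridGet grid i j + pureRecA grid w rowsm1 f0 (i + 1) (j + p.1) (k + p.2))
      else r)
      = (fun (r : Int) (p : Int × Int) =>
      if (0 ≤ j + p.1 ∧ j + p.1 < w) ∧ (0 ≤ k + p.2 ∧ k + p.2 < w) then
        max r ((pvGridGet grid i j + (if j ≠ k then pvGridGet grid i k else 0)) +
          pureRecA grid w rowsm1 f0 (i + 1) (j + p.1) (k + p.2))
      else r) := by
    funext r p
    by_cases hb : (0 ≤ j + p.1 ∧ j + p.1 < w) ∧ (0 ≤ k + p.2 ∧ k + p.2 < w)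
    · rw [if_pos hb, if_pos hb]
      by_cases hjk : j ≠ k
      · rw [if_pos hjk, if_pos hjk]
      · rw [if_neg hjk, if_neg hjk, add_zero]
    · rw [if_neg hb, if_neg hb]
  have hfun3 : (fun (best : Int) (p : Int × Int) =>
      if (0 ≤ j + p.1 ∧ j + p.1 < w) ∧ (0 ≤ k + p.2 ∧ k + p.2 < w) then
        max best (PySem.List.pyGetD (PySem.List.pyGetD dp (j + p.1) []) (k + p.2) 0)
      else best)
      = (fun (best : Int) (p : Int × Int) =>
      if (0 ≤ j + p.1 ∧ j + p.1 < w) ∧ (0 ≤ k + p.2 ∧ k + p.2 < w) then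
        max best (pureRecA grid w rowsm1 f0 (i + 1) (j + p.1) (k + p.2))
      else best) := by
    funext best p
    by_cases hb : (0 ≤ j + p.1 ∧ j + p.1 < w) ∧ (0 ≤ k + p.2 ∧ k + p.2 < w)
    · rw [if_pos hb, if_pos hb, hts p hb]
    · rw [if_neg hb, if_neg hb]
  have hb0 : PySem.List.pyGetD (PySem.List.pyGetD dp j []) k 0
      = pureRecA grid w rowsm1 f0 (i + 1) (j + ((0 : Int), (0 : Int)).1) (k + ((0 : Int), (0 : Int)).2) := by
    have h := hts (0, 0) ⟨⟨by omega, by omega⟩, ⟨by omega, by omega⟩⟩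
    simpa using h
  rw [hf0, hRHS, hfun2, hLHS, hfun3]
  exact (pvFoldMax
    (fun p : Int × Int => (0 ≤ j + p.1 ∧ j + p.1 < w) ∧ (0 ≤ k + p.2 ∧ k + p.2 < w))
    (fun p : Int × Int => pureRecA grid w rowsm1 f0 (i + 1) (j + p.1) (k + p.2))
    (pvGridGet grid i j + (if j ≠ k then pvGridGet grid i k else 0))
    pvL9 ((0 : Int), (0 : Int)) (by decide) ⟨⟨by omega, by omega⟩, ⟨by omega, by omega⟩⟩
    (PySem.List.pyGetD (PySem.List.pyGetD dp j []) k 0) hb0).symm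

theorem pvLoop (grid : List (List Int)) (w rowsm1 : Int) :
    ∀ (cnt : Nat) (a : Int), a + 1 = (cnt : Int) → a ≤ rowsm1 - 1 →
      ∀ dp, pvTableOK grid w rowsm1 (a + 1) dp →
        pvTableOK grid w rowsm1 0 ((PySem.List.pyRange a (-1) (-1)).foldl (bStep grid w) dp) := by
  intro cnt
  induction cnt with
  | zero =>
    intro a ha _ dp ht
    have ha' : a = -1 := by omega
    subst ha'
    rw [PySem.List.pyRange_neg_one_eq_nil (by omega)]
    simpa using ht
  | succ c ih =>
    intro a ha hle dp ht
    have h0 : (0 : Int) ≤ a := by omega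
    rw [PySem.List.pyRange_neg_one_cons (by omega)]
    simp only [List.foldl_cons]
    have := pvStep grid w rowsm1 a dp h0 (by omega) ht
    have hrec := ih (a - 1) (by omega) (by omega) (bStep grid w dp a) (by simpa using this)
    simpa using hrec

theorem pvDp0 (grid : List (List Int)) (w rowsm1 : Int) (hne : grid ≠ [])
    (hrow : rowsm1 = (grid.length : Int) - 1) :
    pvTableOK grid w rowsm1 rowsm1 ((PySem.List.pyRange 0 w 1).map (fun j =>
      (PySem.List.pyRange 0 w 1).map (fun k =>
        PySem.List.pyGetD (PySem.List.pyGetD grid (-1) []) j 0 +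
          (if j ≠ k then PySem.List.pyGetD (PySem.List.pyGetD grid (-1) []) k 0 else 0)))) := by
  intro j k hj0 hj hk0 hk
  have hlen : 1 ≤ grid.length := by
    cases grid with
    | nil => exact absurd rfl hne
    | cons a t => simp
  have hlast : PySem.List.pyGetD grid (-1) ([] : List Int) = PySem.List.pyGetD grid rowsm1 ([] : List Int) := by
    have h1 : (0 : Int) ≤ rowsm1 := by omega
    have h2 : rowsm1 < (grid.length : Int) := by omega
    rw [PySem.List.pyGetD_neg_ofNat grid 1 [] (by omega) (by omega),
        PySem.List.pyGetD_eq_getElem (xs := grid) (d := ([] : List Int)) h1 h2]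
    have hidx : rowsm1.toNat = grid.length - 1 := by rw [hrow]; omega
    simp only [hidx]
  rw [PySem.List.pyGetD_map_pyRange_of_nonneg _ _ _ _ hj0 hj,
      PySem.List.pyGetD_map_pyRange_of_nonneg _ _ _ _ hk0 hk, hlast]
  rw [show (rowsm1 + 1 - rowsm1).toNat = 0 + 1 by omega]
  have hcond : ¬ (¬ (0 ≤ j ∧ j < w) ∨ ¬ (0 ≤ k ∧ k < w)) := by omega
  simp only [pureRecA]
  rw [if_neg hcond]
  simp only [if_true]
  by_cases hjk : j = k
  · rw [if_neg (not_not.mpr hjk), add_zero, if_pos hjk]; rfl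
  · rw [if_pos hjk, if_neg hjk]; rfl

-- ===== VERDICT (by name: the statement is the Claim_ definition above) =====
theorem solve_spec : Claim_equal_solve := by
  intro n m grid _hdom hpre
  obtain ⟨hne, -⟩ := hpre
  have hlen : 1 ≤ grid.length := by
    cases grid with
    | nil => exact absurd rfl hne
    | cons a t => simp
  show solve n m grid = solve_alt n m grid
  simp only [solve, solve_alt]
  set w : Int := ((PySem.List.pyGetD grid 0 ([] : List Int)).length : Int) with hw
  have hw0 : 0 ≤ w := Int.natCast_nonneg _
  by_cases hwz : w = 0
  · rw [if_pos hwz]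
    have hzero : ∀ (fuel : Nat) (d : PySem.Dict (Int × Int × Int) Int),
        (solveRecA grid w ((grid.length : Int) - 1) fuel 0 0 (w - 1) d).1 = 0 := by
      intro fuel d
      cases fuel with
      | zero => rfl
      | succ f =>
        simp only [solveRecA]
        rw [if_pos (Or.inl (by omega))]
    exact hzero _ _
  · rw [if_neg hwz]
    have hwpos : 0 < w := by omega
    have hInvE : pvInv grid w ((grid.length : Int) - 1) PySem.Dict.empty := by
      intro i' j' k' v h
      rw [PySem.Dict.get?_empty] at h
      cases h
    obtain ⟨hA, -⟩ := pvMemo grid w ((grid.length : Int) - 1) grid.length 0 0 (w - 1)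
      PySem.Dict.empty (by omega) hInvE
    have hdp0 := pvDp0 grid w ((grid.length : Int) - 1) hne rfl
    have htbl := pvLoop grid w ((grid.length : Int) - 1) ((grid.length : Int) - 1).toNat
      ((grid.length : Int) - 2) (by omega) (by omega)
      ((PySem.List.pyRange 0 w 1).map (fun j =>
        (PySem.List.pyRange 0 w 1).map (fun k =>
          PySem.List.pyGetD (PySem.List.pyGetD grid (-1) []) j 0 +
            (if j ≠ k then PySem.List.pyGetD (PySem.List.pyGetD grid (-1) []) k 0 else 0))))
      (by rw [show (grid.length : Int) - 2 + 1 = (grid.length : Int) - 1 by omega]; exact hdp0)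
    have hfinal := htbl 0 (w - 1) (by omega) (by omega) (by omega) (by omega)
    rw [hA, hfinal, show ((grid.length : Int) - 1 + 1 - 0).toNat = grid.length by omega]
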